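-- pv_equiv track=rewrite | github.com/clintjohnsn/ds-algo | matrices/easy/positional_elements.py | countPositional
-- ===== SOURCE A (Python) =====
-- def countPositional(a,m,n):
--     count = 0
--     rowmax = [0]*m
--     rowmin = [0]*m
--     colmax = [0]*n
--     colmin = [0]*n
--     for i in range(m):
--         rowmax[i] = max(a[i])
--         rowmin[i] = min(a[i])
--     for j in range(n):
--         aux = []
--         for i in range(m):
--             aux.append(a[i][j])
--         colmax[j] = max(aux)
--         colmin[j] = min(aux)
--     for i in range(m):
--         for j in range(n):
--             if a[i][j] == rowmax[i] or a[i][j] == rowmin[i] or a[i][j] == colmax[j] or a[i][j] == colmin[j]: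
--                 count +=1
--     return count
-- ===== SOURCE B (Python) =====
-- def countPositional(a, m, n):
--     positions = set()
--     for i in range(m):
--         rmax = max(a[i])
--         rmin = min(a[i])
--         for j in range(n):
--             if a[i][j] == rmax or a[i][j] == rmin:
--                 positions.add((i, j))
--     for j in range(n):
--         col = [a[i][j] for i in range(m)]
--         cmax = max(col)
--         cmin = min(col)
--         for i in range(m):
--             if a[i][j] == cmax or a[i][j] == cmin:
--                 positions.add((i, j))
--     return len(positions)
-- ===== Notes on version B (the rewrite author's own statement) =====
-- stated objective: alternative
-- what changed: Instead of precomputing four extrema arrays and counting cells with a four-way OR in one final double pass, B collects the (i,j) positions hit by row extrema and by column extrema into a set (which dedups cells satisfying several conditions) and returns its size.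
import Mathlib
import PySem

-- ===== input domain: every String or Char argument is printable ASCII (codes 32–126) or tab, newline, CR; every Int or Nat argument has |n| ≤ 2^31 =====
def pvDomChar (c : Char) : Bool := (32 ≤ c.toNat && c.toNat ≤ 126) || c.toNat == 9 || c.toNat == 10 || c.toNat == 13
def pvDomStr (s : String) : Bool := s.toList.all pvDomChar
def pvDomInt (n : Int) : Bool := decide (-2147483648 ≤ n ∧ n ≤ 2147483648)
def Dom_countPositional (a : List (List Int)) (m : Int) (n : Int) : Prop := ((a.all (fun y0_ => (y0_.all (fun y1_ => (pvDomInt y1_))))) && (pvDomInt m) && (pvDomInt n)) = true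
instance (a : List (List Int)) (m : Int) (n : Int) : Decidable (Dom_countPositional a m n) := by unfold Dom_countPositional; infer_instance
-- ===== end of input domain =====

-- B replaces A's four extrema arrays and final four-way-OR counting pass by a set of hit
-- positions (row-extremum hits and column-extremum hits, deduplicated) and returns its size.

-- ===== PORT A =====
-- rowmax/rowmin arrays: for i in range(m): rowmax[i] = max(a[i]); rowmin[i] = min(a[i])
def countPositional_rm (a : List (List Int)) (m : Int) : List Int × List Int :=
  (PySem.List.pyRange 0 m 1).foldl (fun p i =>
      (PySem.List.pySetD p.1 i ((PySem.List.max? (PySem.List.pyGetD a i []) (fun x => x)).getD 0),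
       PySem.List.pySetD p.2 i ((PySem.List.min? (PySem.List.pyGetD a i []) (fun x => x)).getD 0)))
    (List.replicate m.toNat 0, List.replicate m.toNat 0)

-- aux = []; for i in range(m): aux.append(a[i][j])
def countPositional_aux (a : List (List Int)) (m : Int) (j : Int) : List Int :=
  (PySem.List.pyRange 0 m 1).foldl (fun acc i =>
      acc ++ [PySem.List.pyGetD (PySem.List.pyGetD a i []) j 0]) []

-- colmax/colmin arrays: for j in range(n): … colmax[j] = max(aux); colmin[j] = min(aux)
def countPositional_cm (a : List (List Int)) (m : Int) (n : Int) : List Int × List Int :=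
  (PySem.List.pyRange 0 n 1).foldl (fun p j =>
      (PySem.List.pySetD p.1 j ((PySem.List.max? (countPositional_aux a m j) (fun x => x)).getD 0),
       PySem.List.pySetD p.2 j ((PySem.List.min? (countPositional_aux a m j) (fun x => x)).getD 0)))
    (List.replicate n.toNat 0, List.replicate n.toNat 0)

def countPositional (a : List (List Int)) (m : Int) (n : Int) : Int :=
  (PySem.List.pyRange 0 m 1).foldl (fun c i =>
    (PySem.List.pyRange 0 n 1).foldl (fun c j =>
      if PySem.List.pyGetD (PySem.List.pyGetD a i []) j 0 = PySem.List.pyGetD (countPositional_rm a m).1 i 0 ∨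
         PySem.List.pyGetD (PySem.List.pyGetD a i []) j 0 = PySem.List.pyGetD (countPositional_rm a m).2 i 0 ∨
         PySem.List.pyGetD (PySem.List.pyGetD a i []) j 0 = PySem.List.pyGetD (countPositional_cm a m n).1 j 0 ∨
         PySem.List.pyGetD (PySem.List.pyGetD a i []) j 0 = PySem.List.pyGetD (countPositional_cm a m n).2 j 0
      then c + 1 else c) c) 0

-- ===== PORT B =====
-- first loop: add (i, j) for every cell equal to its row max or row min
def countPositional_alt_s1 (a : List (List Int)) (m : Int) (n : Int) : PySem.Set (Int × Int) :=
  (PySem.List.pyRange 0 m 1).foldl (fun s i =>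
      let rmax := (PySem.List.max? (PySem.List.pyGetD a i []) (fun x => x)).getD 0
      let rmin := (PySem.List.min? (PySem.List.pyGetD a i []) (fun x => x)).getD 0
      (PySem.List.pyRange 0 n 1).foldl (fun s j =>
        if PySem.List.pyGetD (PySem.List.pyGetD a i []) j 0 = rmax ∨
           PySem.List.pyGetD (PySem.List.pyGetD a i []) j 0 = rmin then
          PySem.Set.add s (i, j) else s) s)
    PySem.Set.empty

-- second loop: add (i, j) for every cell equal to its column max or column min
def countPositional_alt_s2 (a : List (List Int)) (m : Int) (n : Int) : PySem.Set (Int × Int) :=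
  (PySem.List.pyRange 0 n 1).foldl (fun s j =>
      let col := (PySem.List.pyRange 0 m 1).foldl (fun acc i =>
           acc ++ [PySem.List.pyGetD (PySem.List.pyGetD a i []) j 0]) []
      let cmax := (PySem.List.max? col (fun x => x)).getD 0
      let cmin := (PySem.List.min? col (fun x => x)).getD 0
      (PySem.List.pyRange 0 m 1).foldl (fun s i =>
        if PySem.List.pyGetD (PySem.List.pyGetD a i []) j 0 = cmax ∨
           PySem.List.pyGetD (PySem.List.pyGetD a i []) j 0 = cmin then
          PySem.Set.add s (i, j) else s) s)
    (countPositional_alt_s1 a m n)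

def countPositional_alt (a : List (List Int)) (m : Int) (n : Int) : Int :=
  PySem.Set.len (countPositional_alt_s2 a m n)

-- ===== PRECONDITION & SPEC =====
-- Pre_ = exactly the inputs on which Python A returns: at most len(a) rows are addressed, each
-- addressed row is nonempty with at least n entries, and if n > 0 the columns are nonempty (m > 0).
def Pre_countPositional (a : List (List Int)) (m : Int) (n : Int) : Prop :=
  m ≤ (a.length : Int) ∧ (∀ row ∈ a.take m.toNat, row ≠ [] ∧ n ≤ (row.length : Int)) ∧ (0 < n → 0 < m)
instance (a : List (List Int)) (m : Int) (n : Int) : Decidable (Pre_countPositional a m n) := by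
  unfold Pre_countPositional; infer_instance
def pvWitness_countPositional : List (List Int) × Int × Int := ([[1, 2], [3, 4]], 2, 2)
def Spec_countPositional (a : List (List Int)) (m : Int) (n : Int) (out : Int) : Prop := out = countPositional_alt a m n
instance (a : List (List Int)) (m : Int) (n : Int) (out : Int) : Decidable (Spec_countPositional a m n out) := by unfold Spec_countPositional; infer_instance

-- ===== CLAIM (what is proved, stated in full; the proofs are below) =====
def Claim_equal_countPositional : Prop := ∀ (a : List (List Int)) (m : Int) (n : Int), Dom_countPositional a m n → Pre_countPositional a m n → Spec_countPositional a m n (countPositional a m n)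

-- ===== LEMMAS AND PROOFS =====

-- the cell a[i][j] and the four extrema, as closed functions of the input
def pvCell (a : List (List Int)) (i j : Int) : Int :=
  PySem.List.pyGetD (PySem.List.pyGetD a i []) j 0
def pvRMax (a : List (List Int)) (i : Int) : Int :=
  (PySem.List.max? (PySem.List.pyGetD a i []) (fun x => x)).getD 0
def pvRMin (a : List (List Int)) (i : Int) : Int :=
  (PySem.List.min? (PySem.List.pyGetD a i []) (fun x => x)).getD 0
def pvColL (a : List (List Int)) (m j : Int) : List Int :=
  (PySem.List.pyRange 0 m 1).map (fun i => pvCell a i j)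
def pvCMax (a : List (List Int)) (m j : Int) : Int :=
  (PySem.List.max? (pvColL a m j) (fun x => x)).getD 0
def pvCMin (a : List (List Int)) (m j : Int) : Int :=
  (PySem.List.min? (pvColL a m j) (fun x => x)).getD 0
def pvRowHitB (a : List (List Int)) (i j : Int) : Bool :=
  decide (pvCell a i j = pvRMax a i) || decide (pvCell a i j = pvRMin a i)
def pvColHitB (a : List (List Int)) (m : Int) (i j : Int) : Bool :=
  decide (pvCell a i j = pvCMax a m j) || decide (pvCell a i j = pvCMin a m j)
def pvHitB (a : List (List Int)) (m : Int) (i j : Int) : Bool :=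
  pvRowHitB a i j || pvColHitB a m i j
def pvPairs (m n : Int) : List (Int × Int) :=
  (PySem.List.pyRange 0 m 1) ×ˢ (PySem.List.pyRange 0 n 1)

lemma pv_fill_length (f : Int → Int) (l : List Int) :
    ∀ (init : List Int),
      (l.foldl (fun acc t => PySem.List.pySetD acc t (f t)) init).length = init.length := by
  induction l with
  | nil => intro init; rfl
  | cons x t ih =>
      intro init
      simp only [List.foldl_cons]
      rw [ih, PySem.List.length_pySetD]

lemma pv_fill_getD (f : Int → Int) (init : List Int) :
    ∀ (mN : Nat), mN ≤ init.length → ∀ (i : Int), 0 ≤ i → i < (mN : Int) →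
      PySem.List.pyGetD
        ((PySem.List.pyRange 0 (mN : Int) 1).foldl (fun l t => PySem.List.pySetD l t (f t)) init)
        i 0 = f i := by
  intro mN
  induction mN with
  | zero => intro _ i h0 h1; exact absurd h1 (by omega)
  | succ k ih =>
      intro hlen i h0 h1
      have hsplit : PySem.List.pyRange 0 ((k + 1 : Nat) : Int) 1
          = PySem.List.pyRange 0 (k : Int) 1 ++ [(k : Int)] := by
        have hc : ((k + 1 : Nat) : Int) = (k : Int) + 1 := by push_cast; ring
        rw [hc]
        exact PySem.List.pyRange_one_succ_right (by positivity)
      rw [hsplit, List.foldl_append]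
      simp only [List.foldl_cons, List.foldl_nil]
      have hFlen : ((PySem.List.pyRange 0 (k : Int) 1).foldl
          (fun l t => PySem.List.pySetD l t (f t)) init).length = init.length :=
        pv_fill_length f _ init
      have hi : i = ((i.toNat : Nat) : Int) := (Int.toNat_of_nonneg h0).symm
      rw [hi, PySem.List.pyGetD_pySetD_natCast _ k i.toNat _ _ (by rw [hFlen]; omega)]
      by_cases hk : i.toNat = k
      · rw [if_pos hk]
        congr 1
        omega
      · rw [if_neg hk]
        exact ih (by omega) _ (by positivity) (by omega)

lemma pv_rm_getD (a : List (List Int)) (m : Int) (i : Int) (h0 : 0 ≤ i) (h1 : i < m) :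
    PySem.List.pyGetD (countPositional_rm a m).1 i 0 = pvRMax a i ∧
    PySem.List.pyGetD (countPositional_rm a m).2 i 0 = pvRMin a i := by
  have hm : ((m.toNat : Nat) : Int) = m := Int.toNat_of_nonneg (by omega)
  have h2 : countPositional_rm a m
      = ((PySem.List.pyRange 0 m 1).foldl
            (fun l t => PySem.List.pySetD l t (pvRMax a t)) (List.replicate m.toNat 0),
         (PySem.List.pyRange 0 m 1).foldl
            (fun l t => PySem.List.pySetD l t (pvRMin a t)) (List.replicate m.toNat 0)) :=
    PySem.List.foldl_prod_mk
      (fun l t => PySem.List.pySetD l t (pvRMax a t))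
      (fun l t => PySem.List.pySetD l t (pvRMin a t))
      (PySem.List.pyRange 0 m 1) (List.replicate m.toNat 0) (List.replicate m.toNat 0)
  rw [h2]
  constructor
  · show PySem.List.pyGetD ((PySem.List.pyRange 0 m 1).foldl _ _) i 0 = _
    rw [← hm]
    exact pv_fill_getD _ _ m.toNat (by simp) i h0 (by omega)
  · show PySem.List.pyGetD ((PySem.List.pyRange 0 m 1).foldl _ _) i 0 = _
    rw [← hm]
    exact pv_fill_getD _ _ m.toNat (by simp) i h0 (by omega)

lemma pv_aux_eq (a : List (List Int)) (m j : Int) :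
    countPositional_aux a m j = pvColL a m j := by
  unfold countPositional_aux pvColL pvCell
  rw [PySem.List.foldl_append_singleton_eq_map]
  simp

lemma pv_cm_getD (a : List (List Int)) (m n : Int) (j : Int) (h0 : 0 ≤ j) (h1 : j < n) :
    PySem.List.pyGetD (countPositional_cm a m n).1 j 0 = pvCMax a m j ∧
    PySem.List.pyGetD (countPositional_cm a m n).2 j 0 = pvCMin a m j := by
  have hn : ((n.toNat : Nat) : Int) = n := Int.toNat_of_nonneg (by omega)
  have h2 : countPositional_cm a m n
      = ((PySem.List.pyRange 0 n 1).foldl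
            (fun l t => PySem.List.pySetD l t
              ((PySem.List.max? (countPositional_aux a m t) (fun x => x)).getD 0))
            (List.replicate n.toNat 0),
         (PySem.List.pyRange 0 n 1).foldl
            (fun l t => PySem.List.pySetD l t
              ((PySem.List.min? (countPositional_aux a m t) (fun x => x)).getD 0))
            (List.replicate n.toNat 0)) :=
    PySem.List.foldl_prod_mk
      (fun l t => PySem.List.pySetD l t
        ((PySem.List.max? (countPositional_aux a m t) (fun x => x)).getD 0))
      (fun l t => PySem.List.pySetD l t
        ((PySem.List.min? (countPositional_aux a m t) (fun x => x)).getD 0))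
      (PySem.List.pyRange 0 n 1) (List.replicate n.toNat 0) (List.replicate n.toNat 0)
  rw [h2]
  constructor
  · show PySem.List.pyGetD ((PySem.List.pyRange 0 n 1).foldl _ _) j 0 = _
    rw [← hn]
    rw [pv_fill_getD _ _ n.toNat (by simp) j h0 (by omega)]
    rw [pv_aux_eq]
    rfl
  · show PySem.List.pyGetD ((PySem.List.pyRange 0 n 1).foldl _ _) j 0 = _
    rw [← hn]
    rw [pv_fill_getD _ _ n.toNat (by simp) j h0 (by omega)]
    rw [pv_aux_eq]
    rfl

-- A counts, over all (i, j), the cells satisfying the four-way OR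
lemma pv_A_eq (a : List (List Int)) (m n : Int) :
    countPositional a m n
      = ((pvPairs m n).countP (fun q => pvHitB a m q.1 q.2) : Int) := by
  have h1 : countPositional a m n
      = (PySem.List.pyRange 0 m 1).foldl (fun c i =>
          (PySem.List.pyRange 0 n 1).foldl
            (fun c j => if pvHitB a m i j = true then c + 1 else c) c) 0 := by
    unfold countPositional
    refine PySem.List.foldl_congr_mem' _ _ _ _ ?_
    intro i hi c
    obtain ⟨hi0, hi1⟩ := PySem.List.mem_pyRange_one.1 hi
    refine PySem.List.foldl_congr_mem' _ _ _ _ ?_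
    intro j hj c'
    obtain ⟨hj0, hj1⟩ := PySem.List.mem_pyRange_one.1 hj
    refine if_congr ?_ rfl rfl
    rw [(pv_rm_getD a m i hi0 hi1).1, (pv_rm_getD a m i hi0 hi1).2,
        (pv_cm_getD a m n j hj0 hj1).1, (pv_cm_getD a m n j hj0 hj1).2]
    simp [pvHitB, pvRowHitB, pvColHitB, pvCell, or_assoc]
  rw [h1]
  rw [PySem.List.foldl_congr_mem' _ _
      (fun c i => c + (((PySem.List.pyRange 0 n 1).countP (fun j => pvHitB a m i j)) : Int)) 0
      (fun i _ c => PySem.List.foldl_if_add_one (fun j => pvHitB a m i j) _ c)]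
  rw [PySem.List.foldl_add]
  unfold pvPairs
  rw [show ((PySem.List.pyRange 0 m 1) ×ˢ (PySem.List.pyRange 0 n 1) : List (Int × Int))
        = (PySem.List.pyRange 0 m 1).flatMap
            (fun i => (PySem.List.pyRange 0 n 1).map (fun j => (i, j))) from rfl]
  rw [List.countP_flatMap, Nat.cast_list_sum, List.map_map]
  simp [Function.comp_def, List.countP_map]

-- membership in a fold of conditional set-adds
lemma pv_mem_foldl_add_if (p : Int × Int → Bool) (l : List (Int × Int)) :
    ∀ (s : List (Int × Int)) (x : Int × Int),
      (x ∈ l.foldl (fun s q => if p q = true then PySem.Set.add s q else s) s)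
        ↔ x ∈ s ∨ (x ∈ l ∧ p x = true) := by
  induction l with
  | nil => intro s x; simp
  | cons q t ih =>
      intro s x
      simp only [List.foldl_cons]
      rw [ih]
      by_cases hq : p q = true
      · rw [if_pos hq]
        rw [PySem.Set.mem_add]
        constructor
        · rintro ((h | h) | h)
          · exact Or.inl h
          · exact Or.inr ⟨by simp [h], by rwa [h]⟩
          · exact Or.inr ⟨List.mem_cons_of_mem _ h.1, h.2⟩
        · rintro (h | ⟨hmem, hx⟩)
          · exact Or.inl (Or.inl h)
          · rcases List.mem_cons.1 hmem with h | h
            · exact Or.inl (Or.inr h)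
            · exact Or.inr ⟨h, hx⟩
      · rw [if_neg hq]
        constructor
        · rintro (h | h)
          · exact Or.inl h
          · exact Or.inr ⟨List.mem_cons_of_mem _ h.1, h.2⟩
        · rintro (h | ⟨hmem, hx⟩)
          · exact Or.inl h
          · rcases List.mem_cons.1 hmem with h | h
            · subst h; exact absurd hx hq
            · exact Or.inr ⟨h, hx⟩

lemma pv_nodup_add (s : List (Int × Int)) (x : Int × Int) (h : s.Nodup) :
    (PySem.Set.add s x).Nodup := by
  unfold PySem.Set.add
  split_ifs with hc
  · exact h
  · have hx : x ∉ s := fun hmem => hc (by simpa using hmem)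
    rw [List.nodup_append]
    refine ⟨h, List.nodup_singleton x, ?_⟩
    intro y hy b hb
    have hb' : b = x := List.mem_singleton.1 hb
    subst hb'
    exact fun he => hx (he ▸ hy)

lemma pv_nodup_foldl_add_if (p : Int × Int → Bool) (l : List (Int × Int)) :
    ∀ (s : List (Int × Int)), s.Nodup →
      (l.foldl (fun s q => if p q = true then PySem.Set.add s q else s) s).Nodup := by
  induction l with
  | nil => intro s h; exact h
  | cons q t ih =>
      intro s h
      simp only [List.foldl_cons]
      apply ih
      split_ifs with hq
      · exact pv_nodup_add s q h
      · exact h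

-- B's first loop flattened over the pair list
lemma pv_s1_eq (a : List (List Int)) (m n : Int) :
    countPositional_alt_s1 a m n
      = (pvPairs m n).foldl
          (fun s q => if pvRowHitB a q.1 q.2 = true then PySem.Set.add s q else s)
          PySem.Set.empty := by
  unfold countPositional_alt_s1 pvPairs
  rw [show ((PySem.List.pyRange 0 m 1) ×ˢ (PySem.List.pyRange 0 n 1) : List (Int × Int))
        = (PySem.List.pyRange 0 m 1).flatMap
            (fun i => (PySem.List.pyRange 0 n 1).map (fun j => (i, j))) from rfl]
  rw [List.foldl_flatMap]
  refine PySem.List.foldl_congr_mem' _ _ _ _ ?_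
  intro i _ s
  beta_reduce
  rw [List.foldl_map]
  refine PySem.List.foldl_congr_mem' _ _ _ _ ?_
  intro j _ s'
  beta_reduce
  refine if_congr ?_ rfl rfl
  simp [pvRowHitB, pvCell, pvRMax, pvRMin]

-- B's second loop flattened over the (column-order) pair list
lemma pv_s2_eq (a : List (List Int)) (m n : Int) :
    countPositional_alt_s2 a m n
      = ((PySem.List.pyRange 0 n 1).flatMap
            (fun j => (PySem.List.pyRange 0 m 1).map (fun i => (i, j)))).foldl
          (fun s q => if pvColHitB a m q.1 q.2 = true then PySem.Set.add s q else s)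
          (countPositional_alt_s1 a m n) := by
  unfold countPositional_alt_s2
  rw [List.foldl_flatMap]
  refine PySem.List.foldl_congr_mem' _ _ _ _ ?_
  intro j _ s
  beta_reduce
  rw [List.foldl_map]
  refine PySem.List.foldl_congr_mem' _ _ _ _ ?_
  intro i _ s'
  beta_reduce
  refine if_congr ?_ rfl rfl
  rw [PySem.List.foldl_append_singleton_eq_map]
  simp [pvColHitB, pvCMax, pvCMin, pvColL, pvCell]

lemma pv_mem_pairs (m n : Int) (q : Int × Int) :
    q ∈ pvPairs m n ↔ (0 ≤ q.1 ∧ q.1 < m) ∧ (0 ≤ q.2 ∧ q.2 < n) := by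
  obtain ⟨i, j⟩ := q
  unfold pvPairs
  rw [List.mem_product, PySem.List.mem_pyRange_one, PySem.List.mem_pyRange_one]

lemma pv_mem_pairsC (m n : Int) (q : Int × Int) :
    q ∈ (PySem.List.pyRange 0 n 1).flatMap
          (fun j => (PySem.List.pyRange 0 m 1).map (fun i => (i, j)))
      ↔ (0 ≤ q.1 ∧ q.1 < m) ∧ (0 ≤ q.2 ∧ q.2 < n) := by
  simp only [List.mem_flatMap, List.mem_map, PySem.List.mem_pyRange_one]
  constructor
  · rintro ⟨j, hj, i, hi, rfl⟩
    exact ⟨hi, hj⟩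
  · rintro ⟨hi, hj⟩
    exact ⟨q.2, hj, q.1, hi, (Prod.mk.eta)⟩

lemma pv_nodup_pairs (m n : Int) : (pvPairs m n).Nodup :=
  List.Nodup.product (PySem.List.nodup_pyRange_one 0 m) (PySem.List.nodup_pyRange_one 0 n)

lemma pv_mem_s2 (a : List (List Int)) (m n : Int) (q : Int × Int) :
    q ∈ countPositional_alt_s2 a m n ↔ q ∈ pvPairs m n ∧ pvHitB a m q.1 q.2 = true := by
  rw [pv_s2_eq, pv_s1_eq]
  rw [pv_mem_foldl_add_if, pv_mem_foldl_add_if]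
  simp only [pv_mem_pairs, pv_mem_pairsC, PySem.Set.empty, List.not_mem_nil, false_or]
  simp only [pvHitB, Bool.or_eq_true]
  tauto

lemma pv_nodup_s2 (a : List (List Int)) (m n : Int) :
    (countPositional_alt_s2 a m n).Nodup := by
  rw [pv_s2_eq, pv_s1_eq]
  apply pv_nodup_foldl_add_if
  apply pv_nodup_foldl_add_if
  exact List.nodup_nil

lemma pv_B_eq (a : List (List Int)) (m n : Int) :
    countPositional_alt a m n
      = ((pvPairs m n).countP (fun q => pvHitB a m q.1 q.2) : Int) := by
  unfold countPositional_alt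
  have hperm : (countPositional_alt_s2 a m n).Perm
      ((pvPairs m n).filter (fun q => pvHitB a m q.1 q.2)) := by
    rw [List.perm_ext_iff_of_nodup (pv_nodup_s2 a m n)
        (List.Nodup.filter _ (pv_nodup_pairs m n))]
    intro q
    rw [pv_mem_s2, List.mem_filter]
  rw [List.countP_eq_length_filter]
  show ((countPositional_alt_s2 a m n).length : Int) = _
  rw [hperm.length_eq]

-- ===== VERDICT (by name: the statement is the Claim_ definition above) =====
theorem countPositional_spec : Claim_equal_countPositional := by
  intro a m n _ _
  unfold Spec_countPositional
  rw [pv_A_eq, pv_B_eq]
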